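-- pv_equiv track=rewrite | github.com/Andeser-rgb/Esercizi-PA | dynamic_programming/problema08.py | solve
-- ===== SOURCE A (Python) =====
-- from typing import List
--
-- x = 4
--
-- y = 2
--
-- z = 5
--
-- def solve(a: str, s: int, d: int, memo: List[[int]]):
--     if s >= d:
--         return 0
--     if memo[s][d] is None:
--         if a[s] == a[d]:
--             memo[s][d] = solve(a, s + 1, d - 1, memo)
--         else:
--             memo[s][d] = min(
--                 solve(a, s, d - 1, memo) + x,
--                 solve(a, s, d - 1, memo) + y,
--                 solve(a, s + 1, d, memo) + x,
--                 solve(a, s + 1, d, memo) + y,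
--                 solve(a, s + 1, d - 1, memo) + z,
--             )
--     return memo[s][d]
-- ===== SOURCE B (Python) =====
-- x = 4
-- y = 2
-- z = 5
--
-- def solve(a, s, d, memo):
--     # Bottom-up tabulation over the [s..d] sub-triangle; fills only cells that
--     # were None (prefilled cells are kept, exactly as the memoised recursion uses them).
--     # Side effect differs from A's: A fills only the cells its recursion reaches.
--     if s >= d:
--         return 0
--     for g in range(1, d - s + 1):
--         for i in range(s, d - g + 1):
--             j = i + g
--             if memo[i][j] is None:
--                 if a[i] == a[j]:
--                     memo[i][j] = memo[i + 1][j - 1] if g > 2 else 0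
--                 else:
--                     left = memo[i][j - 1] if g > 1 else 0
--                     down = memo[i + 1][j] if g > 1 else 0
--                     diag = memo[i + 1][j - 1] if g > 2 else 0
--                     memo[i][j] = min(left + x, left + y, down + x, down + y, diag + z)
--     return memo[s][d]
-- ===== Notes on version B (the rewrite author's own statement) =====
-- stated objective: alternative
-- what changed: Replaces the top-down memoised recursion with bottom-up tabulation: two nested loops fill every still-None cell of the [s..d] sub-triangle in increasing gap order and return memo[s][d]; Pre_ excludes s<d inputs whose indices are negative/out of range or whose memo rows are shorter than d+1, where A only returns via Python's accidental negative-index wraparound (and can also raise IndexError or RecursionError).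
import Mathlib
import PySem

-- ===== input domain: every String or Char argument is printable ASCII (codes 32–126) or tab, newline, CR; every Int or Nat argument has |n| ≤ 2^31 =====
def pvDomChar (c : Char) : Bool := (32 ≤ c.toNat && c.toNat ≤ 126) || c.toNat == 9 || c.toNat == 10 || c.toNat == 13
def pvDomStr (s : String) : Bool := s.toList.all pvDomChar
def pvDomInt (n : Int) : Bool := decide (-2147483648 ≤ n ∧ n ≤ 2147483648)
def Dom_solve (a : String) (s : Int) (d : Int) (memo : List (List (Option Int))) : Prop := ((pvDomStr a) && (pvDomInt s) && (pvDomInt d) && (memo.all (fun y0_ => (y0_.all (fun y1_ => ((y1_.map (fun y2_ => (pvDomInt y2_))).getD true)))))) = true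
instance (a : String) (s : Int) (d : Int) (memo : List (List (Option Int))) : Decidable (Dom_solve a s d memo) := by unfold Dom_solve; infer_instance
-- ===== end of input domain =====

-- B replaces A's top-down memoised recursion by bottom-up tabulation over the [s..d]
-- sub-triangle in increasing gap order (objective: alternative decomposition).
-- Both Pythons mutate `memo` in place; A fills only the cells its recursion reaches while B
-- fills every still-None cell of the sub-triangle — the theorems are about the RETURN value only.

-- shared index helpers (Python nested indexing, exact: none = IndexError)
-- cellGet m i j = memo[i][j] (read);  cellSet m i j v = `memo[i][j] = v`
-- (on IndexError — only outside Pre_ — cellSet leaves m unchanged where Python raises)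
def cellGet (m : List (List (Option Int))) (i j : Int) : Option (Option Int) :=
  (PySem.List.pyGet? m i).bind (fun r => PySem.List.pyGet? r j)

def cellSet (m : List (List (Option Int))) (i j : Int) (v : Option Int) : List (List (Option Int)) :=
  match PySem.List.pyGet? m i with
  | none => m
  | some r => PySem.List.pySetD m i (PySem.List.pySetD r j v)

-- cellVal m i j : the int Python reads from memo[i][j]; the 0 fallback is reached only
-- where Python would raise (IndexError / TypeError on None), i.e. outside Pre_
def cellVal (m : List (List (Option Int))) (i j : Int) : Int :=
  match cellGet m i j with
  | some (some v) => v
  | _ => 0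

-- ===== PORT A =====
-- state-threading transliteration of A's memoised recursion (module constants x=4, y=2, z=5).
-- `fuel` is only a structural totality guard: every recursive call strictly shrinks d - s, so
-- with the initial fuel (d - s).toNat the 0-fuel arm is never reached on an s < d call.
def solveAux : String → Nat → Int → Int → List (List (Option Int)) →
    Int × List (List (Option Int))
  | _, 0, _, _, m => (0, m)
  | a, fuel + 1, s, d, m =>
    if _h : s ≥ d then (0, m)
    else
      match cellGet m s d with
      | none => (0, m)  -- IndexError reading memo[s][d]; outside Pre_
      | some cell =>
        let m' :=
          if cell = none then
            if PySem.Str.pyGet? a s = PySem.Str.pyGet? a d then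
              let r := solveAux a fuel (s + 1) (d - 1) m
              cellSet r.2 s d (some r.1)
            else
              let r1 := solveAux a fuel s (d - 1) m
              let r2 := solveAux a fuel s (d - 1) r1.2
              let r3 := solveAux a fuel (s + 1) d r2.2
              let r4 := solveAux a fuel (s + 1) d r3.2
              let r5 := solveAux a fuel (s + 1) (d - 1) r4.2
              cellSet r5.2 s d
                (some (min (min (min (min (r1.1 + 4) (r2.1 + 2)) (r3.1 + 4)) (r4.1 + 2)) (r5.1 + 5)))
          else m
        match cellGet m' s d with
        | some (some v) => (v, m')
        | _ => (0, m')  -- unreachable inside Pre_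

def solve (a : String) (s : Int) (d : Int) (memo : List (List (Option Int))) : Int :=
  (solveAux a (d - s).toNat s d memo).1

-- ===== PORT B =====
-- bottom-up tabulation (Source B): for g in range(1, d-s+1): for i in range(s, d-g+1): fill (i, i+g)
def stepB (a : String) (g : Int) (m : List (List (Option Int))) (i : Int) :
    List (List (Option Int)) :=
  let j := i + g
  match cellGet m i j with
  | some none =>
    if PySem.Str.pyGet? a i = PySem.Str.pyGet? a j then
      cellSet m i j (some (if 2 < g then cellVal m (i + 1) (j - 1) else 0))
    else
      let left := if 1 < g then cellVal m i (j - 1) else 0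
      let down := if 1 < g then cellVal m (i + 1) j else 0
      let diag := if 2 < g then cellVal m (i + 1) (j - 1) else 0
      cellSet m i j
        (some (min (min (min (min (left + 4) (left + 2)) (down + 4)) (down + 2)) (diag + 5)))
  | _ => m  -- cell already an int: skip; cell unreadable: Python raises, outside Pre_

def solve_alt (a : String) (s : Int) (d : Int) (memo : List (List (Option Int))) : Int :=
  if s ≥ d then 0
  else
    let final := (PySem.List.pyRange 1 (d - s + 1) 1).foldl
      (fun m g => (PySem.List.pyRange s (d - g + 1) 1).foldl (stepB a g) m) memo
    cellVal final s d

-- ===== PRECONDITION & SPEC =====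
-- Pre_ excludes s<d inputs whose indices are negative / out of range or whose memo rows are
-- shorter than d+1: there A raises IndexError/RecursionError or returns only through Python's
-- accidental negative-index wraparound.
def Pre_solve (a : String) (s : Int) (d : Int) (memo : List (List (Option Int))) : Prop :=
  s ≥ d ∨ (0 ≤ s ∧ d < PySem.Str.len a ∧ d < (memo.length : Int) ∧
    ∀ r ∈ memo, d < (r.length : Int))
instance (a : String) (s : Int) (d : Int) (memo : List (List (Option Int))) : Decidable (Pre_solve a s d memo) := by unfold Pre_solve; infer_instance

def pvWitness_solve : String × Int × Int × List (List (Option Int)) :=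
  ("aba", 0, 2, [[none, none, none], [none, none, none], [none, none, none]])

def Spec_solve (a : String) (s : Int) (d : Int) (memo : List (List (Option Int))) (out : Int) : Prop := out = solve_alt a s d memo
instance (a : String) (s : Int) (d : Int) (memo : List (List (Option Int))) (out : Int) : Decidable (Spec_solve a s d memo out) := by unfold Spec_solve; infer_instance

-- ===== CLAIM (what is proved, stated in full; the proofs are below) =====
def Claim_equal_solve : Prop := ∀ (a : String) (s : Int) (d : Int) (memo : List (List (Option Int))), Dom_solve a s d memo → Pre_solve a s d memo → Spec_solve a s d memo (solve a s d memo)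

-- ===== LEMMAS AND PROOFS =====

-- the pure value both programs compute: A's recursion read off the ORIGINAL memo m0
def pvF (a : String) (m0 : List (List (Option Int))) (s d : Int) : Int :=
  if _h : s ≥ d then 0
  else
    match cellGet m0 s d with
    | some (some v) => v
    | _ =>
      if PySem.Str.pyGet? a s = PySem.Str.pyGet? a d then pvF a m0 (s + 1) (d - 1)
      else
        min (min (min (min (pvF a m0 s (d - 1) + 4) (pvF a m0 s (d - 1) + 2))
          (pvF a m0 (s + 1) d + 4)) (pvF a m0 (s + 1) d + 2)) (pvF a m0 (s + 1) (d - 1) + 5)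
termination_by (d - s).toNat
decreasing_by all_goals omega

-- invariant: the running memo agrees with m0 except that some None cells were filled with pvF
def pvInv (a : String) (m0 m : List (List (Option Int))) : Prop :=
  ∀ i j : Int, 0 ≤ i → 0 ≤ j →
    cellGet m i j = cellGet m0 i j ∨
    (cellGet m0 i j = some none ∧ i < j ∧ cellGet m i j = some (some (pvF a m0 i j)))

lemma pvInv_refl (a : String) (m0 : List (List (Option Int))) : pvInv a m0 m0 :=
  fun _ _ _ _ => Or.inl rfl

lemma pvInv_isSome (a : String) (m0 m : List (List (Option Int))) (hI : pvInv a m0 m)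
    (i j : Int) (h0i : 0 ≤ i) (h0j : 0 ≤ j) (hs : (cellGet m0 i j).isSome) :
    (cellGet m i j).isSome := by
  rcases hI i j h0i h0j with h | ⟨_, _, h⟩
  · rwa [h]
  · simp [h]

lemma pvInv_none (a : String) (m0 m : List (List (Option Int))) (hI : pvInv a m0 m)
    (i j : Int) (h0i : 0 ≤ i) (h0j : 0 ≤ j) (hn : cellGet m i j = some none) :
    cellGet m0 i j = some none := by
  rcases hI i j h0i h0j with h | ⟨h, _, h2⟩
  · rw [← h, hn]
  · rw [hn] at h2; exact absurd h2 (by simp)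

lemma pvInv_read (a : String) (m0 m : List (List (Option Int))) (hI : pvInv a m0 m)
    (i j : Int) (h0i : 0 ≤ i) (hij : i < j) (v : Int)
    (hv : cellGet m i j = some (some v)) : v = pvF a m0 i j := by
  rcases hI i j h0i (by omega) with h | ⟨_, _, h2⟩
  · rw [hv] at h; rw [pvF]; simp [not_le.mpr hij, ← h]
  · rw [hv] at h2; exact Option.some_inj.mp (Option.some_inj.mp h2)

lemma cellSet_get (m : List (List (Option Int))) (s d : Int) (v : Option Int) (c : Option Int)
    (h0s : 0 ≤ s) (h0d : 0 ≤ d) (hc : cellGet m s d = some c) (i j : Int)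
    (h0i : 0 ≤ i) (h0j : 0 ≤ j) :
    cellGet (cellSet m s d v) i j = if i = s ∧ j = d then some v else cellGet m i j := by
  unfold cellGet at hc
  obtain ⟨r, h1, h2⟩ : ∃ r, PySem.List.pyGet? m s = some r ∧ PySem.List.pyGet? r d = some c := by
    cases h : PySem.List.pyGet? m s <;> rw [h] at hc
    · simp at hc
    · exact ⟨_, rfl, by simpa using hc⟩
  have hcs : cellSet m s d v = PySem.List.pySetD m s (PySem.List.pySetD r d v) := by
    unfold cellSet; rw [h1]
  rw [hcs]
  rw [PySem.List.pyGet?_of_nonneg _ h0s] at h1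
  rw [PySem.List.pyGet?_of_nonneg _ h0d] at h2
  obtain ⟨hsl, hr⟩ := List.getElem?_eq_some_iff.mp h1
  obtain ⟨hdl, _⟩ := List.getElem?_eq_some_iff.mp h2
  unfold cellGet
  rw [PySem.List.pySetD_of_nonneg _ _ h0s, PySem.List.pySetD_of_nonneg _ _ h0d,
      PySem.List.pyGet?_of_nonneg _ h0i, PySem.List.pyGet?_of_nonneg _ h0i, List.getElem?_set]
  by_cases his : i = s
  · subst his
    rw [if_pos rfl, if_pos hsl]
    simp only [Option.bind_some]
    rw [PySem.List.pyGet?_of_nonneg _ h0j, h1]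
    simp only [Option.bind_some]
    rw [PySem.List.pyGet?_of_nonneg _ h0j, List.getElem?_set]
    by_cases hjd : j = d
    · subst hjd
      rw [if_pos rfl, if_pos hdl]
      simp
    · rw [if_neg (by omega)]
      simp [hjd]
  · rw [if_neg (by omega)]
    simp [his]


lemma pvInv_cellSet (a : String) (m0 m : List (List (Option Int))) (s d : Int) (c : Option Int)
    (h0s : 0 ≤ s) (hsd : s < d) (hm : cellGet m s d = some c)
    (hm0 : cellGet m0 s d = some none) (hI : pvInv a m0 m) :
    pvInv a m0 (cellSet m s d (some (pvF a m0 s d))) := by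
  intro i j h0i h0j
  rw [cellSet_get m s d _ c h0s (by omega) hm i j h0i h0j]
  by_cases hij : i = s ∧ j = d
  · right; rcases hij with ⟨rfl, rfl⟩; exact ⟨hm0, hsd, by simp⟩
  · simp only [if_neg hij]; exact hI i j h0i h0j

-- ===== A side =====

lemma solveAux_eq (a : String) (m0 : List (List (Option Int))) (D : Int)
    (R : ∀ i j : Int, 0 ≤ i → i < j → j ≤ D → (cellGet m0 i j).isSome) :
    ∀ n : Nat, ∀ s d : Int, ∀ m : List (List (Option Int)),
      (d - s).toNat ≤ n → 0 ≤ s → d ≤ D → pvInv a m0 m →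
      (solveAux a n s d m).1 = pvF a m0 s d ∧ pvInv a m0 (solveAux a n s d m).2 := by
  intro n
  induction n with
  | zero =>
    intro s d m hn h0s hdD hInv
    have hsd : s ≥ d := by omega
    exact ⟨by rw [pvF, dif_pos hsd]; rfl, hInv⟩
  | succ n ih =>
    intro s d m hn h0s hdD hInv
    by_cases hsd : s ≥ d
    · simp only [solveAux, dif_pos hsd]
      exact ⟨by rw [pvF, dif_pos hsd], hInv⟩
    · have h0d : (0 : Int) ≤ d := by omega
      have hsome := pvInv_isSome a m0 m hInv s d h0s h0d (R s d h0s (by omega) hdD)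
      cases hcell : cellGet m s d with
      | none => rw [hcell] at hsome; simp at hsome
      | some cell =>
        cases cell with
        | some v =>
          have hstep : solveAux a (n + 1) s d m = (v, m) := by
            simp only [solveAux]
            rw [dif_neg hsd, hcell]
            simp only [reduceCtorEq, reduceIte]
            rw [hcell]
          rw [hstep]
          exact ⟨pvInv_read a m0 m hInv s d h0s (by omega) v hcell, hInv⟩
        | none =>
          have hm0 := pvInv_none a m0 m hInv s d h0s h0d hcell
          have hFval : pvF a m0 s d =
              if PySem.Str.pyGet? a s = PySem.Str.pyGet? a d then pvF a m0 (s + 1) (d - 1)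
              else
                min (min (min (min (pvF a m0 s (d - 1) + 4) (pvF a m0 s (d - 1) + 2))
                  (pvF a m0 (s + 1) d + 4)) (pvF a m0 (s + 1) d + 2))
                  (pvF a m0 (s + 1) (d - 1) + 5) := by
            conv_lhs => rw [pvF]
            rw [dif_neg hsd, hm0]
          by_cases hch : PySem.Str.pyGet? a s = PySem.Str.pyGet? a d
          · obtain ⟨hv1, hI1⟩ := ih (s + 1) (d - 1) m (by omega) (by omega) (by omega) hInv
            have hsome2 := pvInv_isSome a m0 _ hI1 s d h0s h0d (R s d h0s (by omega) hdD)
            cases hc2 : cellGet (solveAux a n (s + 1) (d - 1) m).2 s d with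
            | none => rw [hc2] at hsome2; simp at hsome2
            | some c2 =>
              have hget := cellSet_get (solveAux a n (s + 1) (d - 1) m).2 s d
                (some (solveAux a n (s + 1) (d - 1) m).1) c2 h0s h0d hc2 s d h0s h0d
              rw [if_pos ⟨rfl, rfl⟩] at hget
              have hpv : (solveAux a n (s + 1) (d - 1) m).1 = pvF a m0 s d := by
                rw [hv1, hFval, if_pos hch]
              have hstep : solveAux a (n + 1) s d m =
                  ((solveAux a n (s + 1) (d - 1) m).1,
                    cellSet (solveAux a n (s + 1) (d - 1) m).2 s d
                      (some (solveAux a n (s + 1) (d - 1) m).1)) := by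
                simp only [solveAux]
                rw [dif_neg hsd, hcell]
                simp only [if_pos hch, reduceIte]
                rw [hget]
              rw [hstep]
              refine ⟨hpv, ?_⟩
              rw [hpv]
              exact pvInv_cellSet a m0 _ s d c2 h0s (by omega) hc2 hm0 hI1
          · obtain ⟨hv1, hI1⟩ := ih s (d - 1) m (by omega) h0s (by omega) hInv
            obtain ⟨hv2, hI2⟩ := ih s (d - 1) (solveAux a n s (d - 1) m).2 (by omega) h0s
              (by omega) hI1
            obtain ⟨hv3, hI3⟩ := ih (s + 1) d
              (solveAux a n s (d - 1) (solveAux a n s (d - 1) m).2).2 (by omega) (by omega)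
              hdD hI2
            obtain ⟨hv4, hI4⟩ := ih (s + 1) d
              (solveAux a n (s + 1) d
                (solveAux a n s (d - 1) (solveAux a n s (d - 1) m).2).2).2
              (by omega) (by omega) hdD hI3
            obtain ⟨hv5, hI5⟩ := ih (s + 1) (d - 1)
              (solveAux a n (s + 1) d (solveAux a n (s + 1) d
                (solveAux a n s (d - 1) (solveAux a n s (d - 1) m).2).2).2).2
              (by omega) (by omega) (by omega) hI4
            set r1 := solveAux a n s (d - 1) m with hr1
            set r2 := solveAux a n s (d - 1) r1.2 with hr2
            set r3 := solveAux a n (s + 1) d r2.2 with hr3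
            set r4 := solveAux a n (s + 1) d r3.2 with hr4
            set r5 := solveAux a n (s + 1) (d - 1) r4.2 with hr5
            have hsome2 := pvInv_isSome a m0 _ hI5 s d h0s h0d (R s d h0s (by omega) hdD)
            cases hc2 : cellGet r5.2 s d with
            | none => rw [hc2] at hsome2; simp at hsome2
            | some c2 =>
              have hpv : min (min (min (min (r1.1 + 4) (r2.1 + 2)) (r3.1 + 4)) (r4.1 + 2))
                  (r5.1 + 5) = pvF a m0 s d := by
                rw [hv1, hv2, hv3, hv4, hv5, hFval, if_neg hch]
              have hget := cellSet_get r5.2 s d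
                (some (min (min (min (min (r1.1 + 4) (r2.1 + 2)) (r3.1 + 4)) (r4.1 + 2))
                  (r5.1 + 5))) c2 h0s h0d hc2 s d h0s h0d
              rw [if_pos ⟨rfl, rfl⟩] at hget
              have hstep : solveAux a (n + 1) s d m =
                  (min (min (min (min (r1.1 + 4) (r2.1 + 2)) (r3.1 + 4)) (r4.1 + 2)) (r5.1 + 5),
                    cellSet r5.2 s d
                      (some (min (min (min (min (r1.1 + 4) (r2.1 + 2)) (r3.1 + 4)) (r4.1 + 2))
                        (r5.1 + 5)))) := by
                simp only [solveAux]
                rw [dif_neg hsd, hcell]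
                simp only [if_neg hch, reduceIte, ← hr1, ← hr2, ← hr3, ← hr4, ← hr5]
                rw [hget]
              rw [hstep]
              refine ⟨hpv, ?_⟩
              rw [hpv]
              exact pvInv_cellSet a m0 _ s d c2 h0s (by omega) hc2 hm0 hI5

-- ===== B side =====

def pvInvGap (a : String) (m0 : List (List (Option Int))) (s d g t : Int)
    (m : List (List (Option Int))) : Prop :=
  pvInv a m0 m ∧ ∀ i j : Int, s ≤ i → i < j → j ≤ d → (j - i < g ∨ (j - i = g ∧ i < t)) →
    cellGet m i j = some (some (pvF a m0 i j))

lemma stepB_inv (a : String) (m0 : List (List (Option Int))) (d : Int)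
    (R : ∀ i j : Int, 0 ≤ i → i < j → j ≤ d → (cellGet m0 i j).isSome)
    (s g c : Int) (hs : 0 ≤ s) (hg : 1 ≤ g) (hc : s ≤ c) (hcd : c ≤ d - g)
    (m : List (List (Option Int))) (hI : pvInvGap a m0 s d g c m) :
    pvInvGap a m0 s d g (c + 1) (stepB a g m c) := by
  obtain ⟨hInv, hGap⟩ := hI
  have h0c : 0 ≤ c := by omega
  have hcj : c < c + g := by omega
  have hjd : c + g ≤ d := by omega
  have hsome := pvInv_isSome a m0 m hInv c (c + g) h0c (by omega) (R c (c + g) h0c hcj hjd)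
  have hread : ∀ i j : Int, s ≤ i → i < j → j ≤ d → j - i < g →
      cellVal m i j = pvF a m0 i j := by
    intro i j h1 h2 h3 h4
    have hg' := hGap i j h1 h2 h3 (Or.inl h4)
    simp [cellVal, hg']
  cases hcell : cellGet m c (c + g) with
  | none => rw [hcell] at hsome; simp at hsome
  | some cell =>
    cases cell with
    | some v =>
      have hstep : stepB a g m c = m := by simp only [stepB]; rw [hcell]
      rw [hstep]
      refine ⟨hInv, fun i j h1 h2 h3 h4 => ?_⟩
      rcases h4 with h | ⟨hg4, hit⟩
      · exact hGap i j h1 h2 h3 (Or.inl h)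
      · by_cases hic : i = c
        · have hjc : j = c + g := by omega
          rw [hic, hjc, hcell, pvInv_read a m0 m hInv c (c + g) h0c hcj v hcell]
        · exact hGap i j h1 h2 h3 (Or.inr ⟨hg4, by omega⟩)
    | none =>
      have hm0 := pvInv_none a m0 m hInv c (c + g) h0c (by omega) hcell
      have hFval : pvF a m0 c (c + g) =
          if PySem.Str.pyGet? a c = PySem.Str.pyGet? a (c + g) then
            pvF a m0 (c + 1) (c + g - 1)
          else
            min (min (min (min (pvF a m0 c (c + g - 1) + 4) (pvF a m0 c (c + g - 1) + 2))
              (pvF a m0 (c + 1) (c + g) + 4)) (pvF a m0 (c + 1) (c + g) + 2))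
              (pvF a m0 (c + 1) (c + g - 1) + 5) := by
        conv_lhs => rw [pvF]
        rw [dif_neg (show ¬ c ≥ c + g by omega), hm0]
      have hfill : pvInvGap a m0 s d g (c + 1) (cellSet m c (c + g) (some (pvF a m0 c (c + g)))) := by
        constructor
        · exact pvInv_cellSet a m0 m c (c + g) none h0c hcj hcell hm0 hInv
        · intro i j h1 h2 h3 h4
          rw [cellSet_get m c (c + g) _ none h0c (by omega) hcell i j (by omega) (by omega)]
          by_cases hij : i = c ∧ j = c + g
          · rw [if_pos hij]; rcases hij with ⟨rfl, rfl⟩; rfl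
          · rw [if_neg hij]
            rcases h4 with h | ⟨hg4, hit⟩
            · exact hGap i j h1 h2 h3 (Or.inl h)
            · refine hGap i j h1 h2 h3 (Or.inr ⟨hg4, ?_⟩)
              by_cases hic : i = c
              · exact absurd ⟨hic, by omega⟩ hij
              · omega
      have hinner : (if 2 < g then cellVal m (c + 1) (c + g - 1) else 0) =
          pvF a m0 (c + 1) (c + g - 1) := by
        by_cases h2g : 2 < g
        · rw [if_pos h2g, hread (c + 1) (c + g - 1) (by omega) (by omega) (by omega) (by omega)]
        · rw [if_neg h2g, pvF, dif_pos (by omega : c + g - 1 ≤ c + 1)]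
      have hleft : (if 1 < g then cellVal m c (c + g - 1) else 0) =
          pvF a m0 c (c + g - 1) := by
        by_cases h1g : 1 < g
        · rw [if_pos h1g, hread c (c + g - 1) (by omega) (by omega) (by omega) (by omega)]
        · rw [if_neg h1g, pvF, dif_pos (by omega : c + g - 1 ≤ c)]
      have hdown : (if 1 < g then cellVal m (c + 1) (c + g) else 0) =
          pvF a m0 (c + 1) (c + g) := by
        by_cases h1g : 1 < g
        · rw [if_pos h1g, hread (c + 1) (c + g) (by omega) (by omega) (by omega) (by omega)]
        · rw [if_neg h1g, pvF, dif_pos (by omega : c + g ≤ c + 1)]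
      by_cases hch : PySem.Str.pyGet? a c = PySem.Str.pyGet? a (c + g)
      · have hstep : stepB a g m c = cellSet m c (c + g) (some (pvF a m0 c (c + g))) := by
          simp only [stepB]
          rw [hcell]
          rw [if_pos hch, hinner, hFval, if_pos hch]
        rw [hstep]; exact hfill
      · have hstep : stepB a g m c = cellSet m c (c + g) (some (pvF a m0 c (c + g))) := by
          simp only [stepB]
          rw [hcell]
          rw [if_neg hch, hleft, hdown, hinner, hFval, if_neg hch]
        rw [hstep]; exact hfill

lemma innerB_inv (a : String) (m0 : List (List (Option Int))) (d : Int)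
    (R : ∀ i j : Int, 0 ≤ i → i < j → j ≤ d → (cellGet m0 i j).isSome)
    (s g : Int) (hs : 0 ≤ s) (hg : 1 ≤ g) :
    ∀ n : Nat, ∀ c : Int, ∀ m : List (List (Option Int)),
      (d - g + 1 - c).toNat ≤ n → s ≤ c → pvInvGap a m0 s d g c m →
      pvInvGap a m0 s d g (d - g + 1)
        ((PySem.List.pyRange c (d - g + 1) 1).foldl (stepB a g) m) := by
  intro n
  induction n with
  | zero =>
    intro c m hn hc hI
    rw [PySem.List.pyRange_one_eq_nil (by omega)]
    exact ⟨hI.1, fun i j h1 h2 h3 h4 => hI.2 i j h1 h2 h3 (by omega)⟩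
  | succ n ih =>
    intro c m hn hc hI
    by_cases hce : d - g + 1 ≤ c
    · rw [PySem.List.pyRange_one_eq_nil (by omega)]
      exact ⟨hI.1, fun i j h1 h2 h3 h4 => hI.2 i j h1 h2 h3 (by omega)⟩
    · rw [PySem.List.pyRange_one_cons (by omega), List.foldl_cons]
      exact ih (c + 1) (stepB a g m c) (by omega) (by omega)
        (stepB_inv a m0 d R s g c hs hg hc (by omega) m hI)

lemma outerB_inv (a : String) (m0 : List (List (Option Int))) (s d : Int)
    (R : ∀ i j : Int, 0 ≤ i → i < j → j ≤ d → (cellGet m0 i j).isSome)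
    (hs : 0 ≤ s) :
    ∀ n : Nat, ∀ g : Int, ∀ m : List (List (Option Int)),
      (d - s + 1 - g).toNat ≤ n → 1 ≤ g → pvInvGap a m0 s d g s m →
      pvInvGap a m0 s d (d - s + 1) s
        ((PySem.List.pyRange g (d - s + 1) 1).foldl
          (fun m g' => (PySem.List.pyRange s (d - g' + 1) 1).foldl (stepB a g') m) m) := by
  intro n
  induction n with
  | zero =>
    intro g m hn hg hI
    rw [PySem.List.pyRange_one_eq_nil (by omega)]
    exact ⟨hI.1, fun i j h1 h2 h3 h4 => hI.2 i j h1 h2 h3 (by omega)⟩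
  | succ n ih =>
    intro g m hn hg hI
    by_cases hge : d - s + 1 ≤ g
    · rw [PySem.List.pyRange_one_eq_nil (by omega)]
      exact ⟨hI.1, fun i j h1 h2 h3 h4 => hI.2 i j h1 h2 h3 (by omega)⟩
    · rw [PySem.List.pyRange_one_cons (by omega), List.foldl_cons]
      have hinner := innerB_inv a m0 d R s g hs hg (d - g + 1 - s).toNat s m le_rfl le_rfl hI
      refine ih (g + 1) _ (by omega) (by omega) ⟨hinner.1, ?_⟩
      intro i j h1 h2 h3 h4
      exact hinner.2 i j h1 h2 h3 (by omega)

-- ===== VERDICT (by name: the statement is the Claim_ definition above) =====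
theorem solve_spec : Claim_equal_solve := by
  intro a s d memo _hdom hpre
  unfold Spec_solve
  by_cases hsd : s ≥ d
  · have h0 : (d - s).toNat = 0 := by omega
    rw [solve, solve_alt, h0]
    simp [solveAux, hsd]
  · rcases hpre with h | ⟨h0s, hlen, hml, hrl⟩
    · omega
    have R : ∀ i j : Int, 0 ≤ i → i < j → j ≤ d → (cellGet memo i j).isSome := by
      intro i j h0i hij hjd
      have hil : i.toNat < memo.length := by omega
      have hrow := hrl memo[i.toNat] (memo.getElem_mem hil)
      unfold cellGet
      rw [PySem.List.pyGet?_of_nonneg _ h0i, List.getElem?_eq_getElem hil]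
      simp only [Option.bind_some]
      rw [PySem.List.pyGet?_of_nonneg _ (by omega : (0 : Int) ≤ j),
        List.getElem?_eq_getElem (by omega : j.toNat < memo[i.toNat].length)]
      simp
    have hA := (solveAux_eq a memo d R (d - s).toNat s d memo le_rfl h0s le_rfl
      (pvInv_refl a memo)).1
    have hB := outerB_inv a memo s d R h0s (d - s).toNat 1 memo (by omega) le_rfl
      ⟨pvInv_refl a memo, fun i j h1 h2 h3 h4 => by omega⟩
    rw [solve, hA, solve_alt, if_neg hsd]
    have hcell := hB.2 s d le_rfl (by omega) le_rfl (by omega)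
    simp only [cellVal, hcell]
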